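-- pv_equiv track=rewrite | github.com/DanielAlexander27/yyc-algorithm | matrix_operators.py | gammaOperator
-- ===== SOURCE A (Python) =====
-- from typing import List
--
-- def gammaOperator(matrixA: List[List[int]], matrixB: List[List[int]] = None, nTimes: int = 1) -> List[List[int]]:
--     result:List[List[int]] = []
--
--     # Si no se recibe un valor para la matriz B, esto quiere decir que el operador va a actuar sobre
--     # la misma matriz A.
--     if (matrixB is None):
--
--         if (nTimes == 1 ):
--             return matrixA
--
--         # Se debe restar una unidad ya que, si el usuario solicita 2 veces, el for se ejecutaria desde
--         # 0 a 2 (0, 1, 2). Por tal razon, se hace la resta.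
--         nTimes = nTimes - 1
--         matrixB = matrixA
--
--     numColumnsB = len(matrixB[0])
--     emptyZerosForA = [0]*numColumnsB
--
--     for times in range(0, nTimes):
--
--         if (times != 0):
--             matrixA = result
--             result:List[List[int]] = []
--
--         numColumnsA = len(matrixA[0])
--         emptyZerosForB = [0]*numColumnsA
--
--         for rowA in matrixA:
--             result.append([*rowA, *emptyZerosForA])
--
--         for rowB in matrixB:
--             result.append([*emptyZerosForB, *rowB])
--
--
--     return result
-- ===== SOURCE B (Python) =====
-- from typing import List
--
-- def gammaOperator(matrixA: List[List[int]], matrixB: List[List[int]] = None, nTimes: int = 1) -> List[List[int]]: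
--     # Direct one-pass construction of the block-diagonal result: each output row is built once.
--     if matrixB is None:
--         if nTimes == 1:
--             return matrixA
--         matrixB = matrixA
--         nTimes = nTimes - 1
--     if nTimes <= 0:
--         return []
--     cB = len(matrixB[0])
--     wA = len(matrixA[0])
--     aRows = [row + [0] * (nTimes * cB) for row in matrixA]
--     bRows = [[0] * (wA + k * cB) + row + [0] * ((nTimes - 1 - k) * cB)
--              for k in range(nTimes)
--              for row in matrixB]
--     return aRows + bRows
-- ===== Notes on version B (the rewrite author's own statement) =====
-- stated objective: faster
-- what changed: A rebuilds the whole accumulated block-diagonal matrix nTimes times (re-padding every already-built row on each iteration); B computes the block offsets and writes each output row exactly once in a single pass; intended as faster (measured 5-9x at n=256; unconfirmed at the largest probe size, where the output itself is huge and both time out).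
import Mathlib
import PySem

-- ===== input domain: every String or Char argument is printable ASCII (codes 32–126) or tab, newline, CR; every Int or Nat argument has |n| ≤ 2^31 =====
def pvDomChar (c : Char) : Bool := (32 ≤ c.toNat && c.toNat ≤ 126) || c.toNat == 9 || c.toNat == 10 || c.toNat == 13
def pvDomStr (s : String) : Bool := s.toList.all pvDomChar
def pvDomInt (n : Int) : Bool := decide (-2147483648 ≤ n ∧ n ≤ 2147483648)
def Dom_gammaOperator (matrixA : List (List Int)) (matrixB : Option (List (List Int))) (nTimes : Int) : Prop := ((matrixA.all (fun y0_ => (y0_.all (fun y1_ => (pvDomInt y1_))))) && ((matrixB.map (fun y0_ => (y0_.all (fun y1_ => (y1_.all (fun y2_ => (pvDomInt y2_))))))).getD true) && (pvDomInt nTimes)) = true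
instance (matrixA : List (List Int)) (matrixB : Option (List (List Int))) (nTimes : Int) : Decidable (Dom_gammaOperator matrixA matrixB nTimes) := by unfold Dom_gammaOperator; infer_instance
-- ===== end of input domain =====

-- B replaces A's repeated rebuild-the-accumulated-matrix loop by a direct one-pass
-- construction with offsets, writing each output row once (intended as faster;
-- a timing run measured 5-9x at n=256 but unconfirmed at the largest size, where both time out).

-- ===== PORT A =====
-- shared tail of A after the matrixB-is-None normalisation (the loop over range(0, nTimes))
def gammaOperatorLoop (matrixA matrixB : List (List Int)) (nTimes : Int) : List (List Int) :=
  let emptyZerosForA := List.replicate ((PySem.List.pyGet? matrixB 0).getD []).length (0 : Int)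
  ((PySem.List.pyRange 0 nTimes 1).foldl
    (fun (st : List (List Int) × List (List Int)) (times : Int) =>
      let mA := if times ≠ 0 then st.2 else st.1
      let res0 : List (List Int) := if times ≠ 0 then [] else st.2
      let emptyZerosForB := List.replicate ((PySem.List.pyGet? mA 0).getD []).length (0 : Int)
      let res1 := mA.foldl (fun r rowA => r ++ [rowA ++ emptyZerosForA]) res0
      let res2 := matrixB.foldl (fun r rowB => r ++ [emptyZerosForB ++ rowB]) res1
      (mA, res2))
    (matrixA, ([] : List (List Int)))).2

def gammaOperator (matrixA : List (List Int)) (matrixB : Option (List (List Int))) (nTimes : Int) : List (List Int) :=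
  match matrixB with
  | none => if nTimes = 1 then matrixA else gammaOperatorLoop matrixA matrixA (nTimes - 1)
  | some mB => gammaOperatorLoop matrixA mB nTimes

-- ===== PORT B =====
def gammaBlocks (mA mB : List (List Int)) (n : Int) : List (List Int) :=
  if n ≤ 0 then []
  else
    let cB := ((PySem.List.pyGet? mB 0).getD []).length
    let wA := ((PySem.List.pyGet? mA 0).getD []).length
    let aRows := mA.map (fun row => row ++ List.replicate (n.toNat * cB) (0 : Int))
    let bRows := (List.range n.toNat).flatMap (fun k =>
      mB.map (fun row => List.replicate (wA + k * cB) (0 : Int) ++ row ++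
        List.replicate ((n.toNat - 1 - k) * cB) (0 : Int)))
    aRows ++ bRows

def gammaOperator_alt (matrixA : List (List Int)) (matrixB : Option (List (List Int))) (nTimes : Int) : List (List Int) :=
  match matrixB with
  | none => if nTimes = 1 then matrixA else gammaBlocks matrixA matrixA (nTimes - 1)
  | some mB => gammaBlocks matrixA mB nTimes

-- ===== PRECONDITION & SPEC =====
-- Pre_ excludes exactly the inputs where Python A raises IndexError on matrixB[0] / matrixA[0]
-- (an empty matrixB, or an empty matrixA when the loop must run or be used as matrixB).
def Pre_gammaOperator (matrixA : List (List Int)) (matrixB : Option (List (List Int))) (nTimes : Int) : Prop :=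
  (matrixB = none → (nTimes = 1 ∨ matrixA ≠ [])) ∧
  (matrixB ≠ none → (matrixB ≠ some [] ∧ (1 ≤ nTimes → matrixA ≠ [])))
instance (matrixA : List (List Int)) (matrixB : Option (List (List Int))) (nTimes : Int) : Decidable (Pre_gammaOperator matrixA matrixB nTimes) := by unfold Pre_gammaOperator; infer_instance
def pvWitness_gammaOperator : List (List Int) × Option (List (List Int)) × Int := ([[1]], some [[2]], 1)

def Spec_gammaOperator (matrixA : List (List Int)) (matrixB : Option (List (List Int))) (nTimes : Int) (out : List (List Int)) : Prop := out = gammaOperator_alt matrixA matrixB nTimes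
instance (matrixA : List (List Int)) (matrixB : Option (List (List Int))) (nTimes : Int) (out : List (List Int)) : Decidable (Spec_gammaOperator matrixA matrixB nTimes out) := by unfold Spec_gammaOperator; infer_instance

-- ===== CLAIM (what is proved, stated in full; the proofs are below) =====
def Claim_equal_gammaOperator : Prop := ∀ (matrixA : List (List Int)) (matrixB : Option (List (List Int))) (nTimes : Int), Dom_gammaOperator matrixA matrixB nTimes → Pre_gammaOperator matrixA matrixB nTimes → Spec_gammaOperator matrixA matrixB nTimes (gammaOperator matrixA matrixB nTimes)
-- ===== LEMMAS AND PROOFS =====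

-- one iteration of A's loop, as a function of the accumulated matrix X
def gIter (mB : List (List Int)) (zA : List Int) (X : List (List Int)) : List (List Int) :=
  X.map (fun r => r ++ zA) ++
  mB.map (fun r => List.replicate ((PySem.List.pyGet? X 0).getD []).length (0 : Int) ++ r)

-- closed form: k copies of mB below mA, built with offsets (mirrors gammaBlocks on Nat)
def gBlocks (mA mB : List (List Int)) (cB wA k : Nat) : List (List Int) :=
  mA.map (fun row => row ++ List.replicate (k * cB) (0 : Int)) ++
  (List.range k).flatMap (fun j =>
    mB.map (fun row => List.replicate (wA + j * cB) (0 : Int) ++ row ++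
      List.replicate ((k - 1 - j) * cB) (0 : Int)))

theorem flatten_map_singleton {α β : Type} (g : α → β) (l : List α) :
    (List.map (fun x => [g x]) l).flatten = List.map g l := by
  induction l with
  | nil => rfl
  | cons h t ih => simp [ih]

theorem loop_state (mA mB : List (List Int)) (m : Nat) :
    (PySem.List.pyRange 0 ((m : Int) + 1) 1).foldl
      (fun (st : List (List Int) × List (List Int)) (times : Int) =>
        let mA' := if times ≠ 0 then st.2 else st.1
        let res0 : List (List Int) := if times ≠ 0 then [] else st.2
        let emptyZerosForB := List.replicate ((PySem.List.pyGet? mA' 0).getD []).length (0 : Int)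
        let res1 := mA'.foldl (fun r rowA => r ++ [rowA ++ List.replicate ((PySem.List.pyGet? mB 0).getD []).length (0 : Int)]) res0
        let res2 := mB.foldl (fun r rowB => r ++ [emptyZerosForB ++ rowB]) res1
        (mA', res2))
      (mA, ([] : List (List Int)))
    = ((gIter mB (List.replicate ((PySem.List.pyGet? mB 0).getD []).length (0 : Int)))^[m] mA,
       (gIter mB (List.replicate ((PySem.List.pyGet? mB 0).getD []).length (0 : Int)))^[m + 1] mA) := by
  induction m with
  | zero =>
      rw [show ((0 : Nat) : Int) + 1 = 0 + 1 by simp, PySem.List.pyRange_one_singleton]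
      simp [gIter, flatten_map_singleton]
  | succ m ih =>
      have hcast : ((m + 1 : Nat) : Int) + 1 = ((m : Int) + 1) + 1 := by push_cast; ring
      have hne : ((m : Int) + 1) ≠ 0 := by omega
      rw [hcast, PySem.List.pyRange_one_succ_right (by omega : (0 : Int) ≤ (m : Int) + 1),
        List.foldl_append, ih]
      simp [hne, gIter, flatten_map_singleton,
        Function.iterate_succ_apply' _ (m + 1)]

theorem gBlocks_head (h : List Int) (t mB : List (List Int)) (cB m : Nat) :
    ((PySem.List.pyGet? (gBlocks (h :: t) mB cB h.length m) 0).getD []).length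
      = h.length + m * cB := by
  simp [gBlocks, List.cons_append, PySem.List.pyGet?_zero_cons]

theorem gIter_step (h : List Int) (t mB : List (List Int)) (cB k : Nat) :
    gIter mB (List.replicate cB (0 : Int)) (gBlocks (h :: t) mB cB h.length (k + 1))
      = gBlocks (h :: t) mB cB h.length (k + 2) := by
  unfold gIter
  rw [gBlocks_head]
  conv_lhs => rw [gBlocks]
  conv_rhs => rw [gBlocks]
  rw [List.map_append, List.map_map, List.map_flatMap,
    List.range_succ (n := k + 1), List.flatMap_append, List.append_assoc]
  congr 1
  · apply List.map_congr_left
    intro r _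
    simp only [Function.comp_apply, List.append_assoc, ← List.replicate_add]
    rw [show (k + 1) * cB + cB = (k + 2) * cB from by ring]
  · congr 1
    · apply List.flatMap_congr
      intro j hj
      rw [List.mem_range] at hj
      rw [List.map_map]
      apply List.map_congr_left
      intro r _
      simp only [Function.comp_apply, List.append_assoc, ← List.replicate_add]
      rw [show (k + 1 - 1 - j) * cB + cB = (k + 2 - 1 - j) * cB from by
        rw [show k + 1 - 1 - j = k - j from by omega, show k + 2 - 1 - j = (k - j) + 1 from by omega]
        ring]
    · simp

theorem iter_eq_blocks (h : List Int) (t mB : List (List Int)) (cB : Nat) (k : Nat) :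
    (gIter mB (List.replicate cB (0 : Int)))^[k + 1] (h :: t)
      = gBlocks (h :: t) mB cB h.length (k + 1) := by
  induction k with
  | zero => simp [gIter, gBlocks]
  | succ k ih => rw [Function.iterate_succ_apply' _ (k + 1), ih, gIter_step]

theorem loop_eq_blocks (mA mB : List (List Int)) (n : Int) (hA : mA ≠ []) (hn : 1 ≤ n) :
    gammaOperatorLoop mA mB n = gammaBlocks mA mB n := by
  obtain ⟨h, t, rfl⟩ := List.exists_cons_of_ne_nil hA
  obtain ⟨m, rfl⟩ : ∃ m : Nat, n = (m : Int) + 1 :=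
    ⟨(n - 1).toNat, by omega⟩
  simp only [gammaOperatorLoop]
  rw [loop_state, iter_eq_blocks]
  unfold gammaBlocks
  rw [if_neg (by omega : ¬ ((m : Int) + 1 ≤ 0))]
  simp only [PySem.List.pyGet?_zero_cons, Option.getD_some]
  rw [show ((m : Int) + 1).toNat = m + 1 from by omega]
  rfl

theorem loop_nil (mA mB : List (List Int)) (n : Int) (hn : n ≤ 0) :
    gammaOperatorLoop mA mB n = [] := by
  simp [gammaOperatorLoop, PySem.List.pyRange_one_eq_nil (by omega : n ≤ 0)]

theorem blocks_nil (mA mB : List (List Int)) (n : Int) (hn : n ≤ 0) :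
    gammaBlocks mA mB n = [] := by
  simp [gammaBlocks, hn]

-- ===== VERDICT (by name: the statement is the Claim_ definition above) =====
theorem gammaOperator_spec : Claim_equal_gammaOperator := by
  intro mA mB n _ hpre
  unfold Spec_gammaOperator gammaOperator gammaOperator_alt
  obtain ⟨h1, h2⟩ := hpre
  cases mB with
  | none =>
      by_cases hn1 : n = 1
      · simp [hn1]
      · have hA : mA ≠ [] := (h1 rfl).resolve_left hn1
        by_cases hle : n - 1 ≤ 0
        · simp [hn1, loop_nil mA mA (n-1) hle, blocks_nil mA mA (n-1) hle]
        · simp [hn1, loop_eq_blocks mA mA (n-1) hA (by omega)]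
  | some bs =>
      by_cases hle : n ≤ 0
      · simp [loop_nil mA bs n hle, blocks_nil mA bs n hle]
      · have hA : mA ≠ [] := (h2 (by simp)).2 (by omega)
        simp [loop_eq_blocks mA bs n hA (by omega)]
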